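-- pv_equiv track=rewrite | github.com/sohamdeep1/Unix-Linux-Termial- | command_parser.py | cmd_seq
-- ===== SOURCE A (Python) =====
-- def cmd_seq(args):
--     """Generate sequence of numbers"""
--     if not args:
--         return "seq: missing operand"
--
--     try:
--         if len(args) == 1:
--             start, end, step = 1, int(args[0]), 1
--         elif len(args) == 2:
--             start, end, step = int(args[0]), int(args[1]), 1
--         else:
--             start, step, end = int(args[0]), int(args[1]), int(args[2])
--     except ValueError:
--         return "seq: invalid number"
--
--     if step == 0:
--         return "seq: step must not be zero"
--
--     out = []
--     i = start
--
--     if step > 0: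
--         while i <= end:
--             out.append(str(i))
--             i += step
--     else:
--         while i >= end:
--             out.append(str(i))
--             i += step
--     if len(out) > 1000:
--         return "seq: sequence too large (limit: 1000 numbers)"
--     return "\n".join(out)
-- ===== SOURCE B (Python) =====
-- def cmd_seq(args):
--     """Generate sequence of numbers (closed-form count, index-based generation)."""
--     if not args:
--         return "seq: missing operand"
--
--     try:
--         nums = [int(x) for x in args[:3]]
--     except ValueError:
--         return "seq: invalid number"
--
--     if len(nums) == 1:
--         start, step, end = 1, 1, nums[0]
--     elif len(nums) == 2:
--         start, step, end = nums[0], 1, nums[1]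
--     else:
--         start, step, end = nums
--
--     if step == 0:
--         return "seq: step must not be zero"
--
--     count = max(0, (end - start) // step + 1)
--     if count > 1000:
--         return "seq: sequence too large (limit: 1000 numbers)"
--     return "\n".join(str(start + k * step) for k in range(count))
-- ===== Notes on version B (the rewrite author's own statement) =====
-- stated objective: alternative
-- what changed: Replaced the two sign-dependent while loops with a closed-form element count max(0,(end-start)//step+1) checked before generation, then index-based construction str(start+k*step) for k in range(count).
import Mathlib
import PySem

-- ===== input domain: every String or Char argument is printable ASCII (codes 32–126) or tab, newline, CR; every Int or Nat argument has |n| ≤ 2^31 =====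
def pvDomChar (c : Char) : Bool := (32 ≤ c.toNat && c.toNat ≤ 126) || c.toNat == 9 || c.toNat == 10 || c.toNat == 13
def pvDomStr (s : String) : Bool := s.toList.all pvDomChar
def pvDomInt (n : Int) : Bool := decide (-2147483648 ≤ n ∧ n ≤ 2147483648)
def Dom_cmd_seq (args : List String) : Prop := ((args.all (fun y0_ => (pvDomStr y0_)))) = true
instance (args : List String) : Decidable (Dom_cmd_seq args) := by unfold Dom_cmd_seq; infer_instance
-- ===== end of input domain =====

-- B replaces A's two sign-dependent while loops (which build the whole sequence before the
-- 1000-element check) by a closed-form count checked up-front plus index-based generation.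

-- ===== PORT A =====
-- the 'while i <= end' loop (step > 0), collecting str(i)
def seqUpA (i e s : Int) (hs : 0 < s) : List String :=
  if i ≤ e then PySem.Int.toStr i :: seqUpA (i + s) e s hs else []
termination_by (e + s - i).toNat
decreasing_by omega

-- the 'while i >= end' loop (step < 0), collecting str(i)
def seqDownA (i e s : Int) (hs : s < 0) : List String :=
  if i ≥ e then PySem.Int.toStr i :: seqDownA (i + s) e s hs else []
termination_by (i - e - s).toNat
decreasing_by omega

-- the final length check and join
def seqFinishA (out : List String) : String :=
  if out.length > 1000 then "seq: sequence too large (limit: 1000 numbers)"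
  else PySem.Str.join "\n" out

-- everything after the parsing (from 'if step == 0' on)
def seqCoreA (start e step : Int) : String :=
  if h0 : step = 0 then "seq: step must not be zero"
  else seqFinishA (if hp : 0 < step then seqUpA start e step hp
                   else seqDownA start e step (by omega))

def cmd_seq (args : List String) : String :=
  match args with
  | [] => "seq: missing operand"
  | [a0] =>
    match PySem.Int.ofStr? a0 with
    | none => "seq: invalid number"
    | some e => seqCoreA 1 e 1
  | [a0, a1] =>
    match PySem.Int.ofStr? a0 with
    | none => "seq: invalid number"
    | some start =>
      match PySem.Int.ofStr? a1 with
      | none => "seq: invalid number"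
      | some e => seqCoreA start e 1
  | a0 :: a1 :: a2 :: _ =>
    match PySem.Int.ofStr? a0 with
    | none => "seq: invalid number"
    | some start =>
      match PySem.Int.ofStr? a1 with
      | none => "seq: invalid number"
      | some step =>
        match PySem.Int.ofStr? a2 with
        | none => "seq: invalid number"
        | some e => seqCoreA start e step

-- ===== PORT B =====
-- everything after the parsing in Source B (from 'if step == 0' on)
def seqCoreB (start step e : Int) : String :=
  if step = 0 then "seq: step must not be zero"
  else if max 0 (PySem.Int.floordiv (e - start) step + 1) > 1000 then
    "seq: sequence too large (limit: 1000 numbers)"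
  else PySem.Str.join "\n"
    ((List.range (max 0 (PySem.Int.floordiv (e - start) step + 1)).toNat).map
      (fun (k : Nat) => PySem.Int.toStr (start + (k : Int) * step)))

def cmd_seq_alt (args : List String) : String :=
  if args = [] then "seq: missing operand"
  else
    match (args.take 3).mapM PySem.Int.ofStr? with
    | none => "seq: invalid number"
    | some nums =>
      match nums with
      | [e] => seqCoreB 1 1 e
      | [a, b] => seqCoreB a 1 b
      | a :: b :: c :: _ => seqCoreB a b c
      | [] => "seq: missing operand"  -- unreachable: args ≠ [] gives nums ≠ []

-- ===== PRECONDITION & SPEC =====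
def Spec_cmd_seq (args : List String) (out : String) : Prop := out = cmd_seq_alt args
instance (args : List String) (out : String) : Decidable (Spec_cmd_seq args out) := by unfold Spec_cmd_seq; infer_instance

-- ===== CLAIM (what is proved, stated in full; the proofs are below) =====
def Claim_equal_cmd_seq : Prop := ∀ (args : List String), Dom_cmd_seq args → Spec_cmd_seq args (cmd_seq args)

-- ===== LEMMAS AND PROOFS =====

theorem seqUpA_eq (i e s : Int) (hs : 0 < s) :
    seqUpA i e s hs =
      (List.range (max 0 (PySem.Int.floordiv (e - i) s + 1)).toNat).map
        (fun (k : Nat) => PySem.Int.toStr (i + (k : Int) * s)) := by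
  rw [seqUpA]
  split
  · next hle =>
    have h0 : (0:Int) ≤ PySem.Int.floordiv (e - i) s :=
      (PySem.Int.le_floordiv_iff_mul_le hs).2 (by omega)
    have hstep : PySem.Int.floordiv (e - (i + s)) s = PySem.Int.floordiv (e - i) s - 1 := by
      rw [PySem.Int.floordiv_eq_ediv_of_pos hs, PySem.Int.floordiv_eq_ediv_of_pos hs]
      have : e - (i + s) = (e - i) + (-1) * s := by ring
      rw [this, Int.add_mul_ediv_right _ _ (by omega : s ≠ 0)]
      ring
    rw [seqUpA_eq (i + s) e s hs, hstep]
    have hn : (max 0 (PySem.Int.floordiv (e - i) s + 1)).toNat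
        = (max 0 (PySem.Int.floordiv (e - i) s - 1 + 1)).toNat + 1 := by omega
    rw [hn, List.range_succ_eq_map, List.map_cons, List.map_map]
    congr 1
    · norm_num
    · apply List.map_congr_left
      intro k _
      simp only [Function.comp]
      congr 1
      push_cast
      ring
  · next hgt =>
    have h0 : PySem.Int.floordiv (e - i) s < 0 :=
      (PySem.Int.floordiv_lt_iff_lt_mul hs).2 (by omega)
    have : (max 0 (PySem.Int.floordiv (e - i) s + 1)).toNat = 0 := by omega
    rw [this]
    simp
termination_by (e + s - i).toNat
decreasing_by omega

theorem seqDownA_eq (i e s : Int) (hs : s < 0) :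
    seqDownA i e s hs =
      (List.range (max 0 (PySem.Int.floordiv (e - i) s + 1)).toNat).map
        (fun (k : Nat) => PySem.Int.toStr (i + (k : Int) * s)) := by
  rw [seqDownA]
  have hneg : PySem.Int.floordiv (e - i) s = PySem.Int.floordiv (i - e) (-s) := by
    rw [← PySem.Int.floordiv_neg_neg (i - e) (-s)]; norm_num
  have hs' : (0:Int) < -s := by omega
  split
  · next hge =>
    have h0 : (0:Int) ≤ PySem.Int.floordiv (e - i) s := by
      rw [hneg]; exact (PySem.Int.le_floordiv_iff_mul_le hs').2 (by omega)
    have hstep : PySem.Int.floordiv (e - (i + s)) s = PySem.Int.floordiv (e - i) s - 1 := by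
      have h1 : PySem.Int.floordiv (e - (i + s)) s = PySem.Int.floordiv (i + s - e) (-s) := by
        rw [← PySem.Int.floordiv_neg_neg (i + s - e) (-s)]; norm_num
      rw [h1, hneg, PySem.Int.floordiv_eq_ediv_of_pos hs', PySem.Int.floordiv_eq_ediv_of_pos hs']
      have : i + s - e = (i - e) + (-1) * (-s) := by ring
      rw [this, Int.add_mul_ediv_right _ _ (by omega : -s ≠ 0)]
      ring
    rw [seqDownA_eq (i + s) e s hs, hstep]
    have hn : (max 0 (PySem.Int.floordiv (e - i) s + 1)).toNat
        = (max 0 (PySem.Int.floordiv (e - i) s - 1 + 1)).toNat + 1 := by omega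
    rw [hn, List.range_succ_eq_map, List.map_cons, List.map_map]
    congr 1
    · norm_num
    · apply List.map_congr_left
      intro k _
      simp only [Function.comp]
      congr 1
      push_cast
      ring
  · next hlt =>
    have h0 : PySem.Int.floordiv (e - i) s < 0 := by
      rw [hneg]; exact (PySem.Int.floordiv_lt_iff_lt_mul hs').2 (by omega)
    have : (max 0 (PySem.Int.floordiv (e - i) s + 1)).toNat = 0 := by omega
    rw [this]
    simp
termination_by (i - e - s).toNat
decreasing_by omega

theorem core_eq (start e step : Int) : seqCoreA start e step = seqCoreB start step e := by
  unfold seqCoreA seqCoreB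
  by_cases h0 : step = 0
  · simp [h0]
  · rw [dif_neg h0, if_neg h0]
    have hout : (if hp : 0 < step then seqUpA start e step hp
                 else seqDownA start e step (by omega)) =
        (List.range (max 0 (PySem.Int.floordiv (e - start) step + 1)).toNat).map
          (fun (k : Nat) => PySem.Int.toStr (start + (k : Int) * step)) := by
      split
      · exact seqUpA_eq _ _ _ _
      · exact seqDownA_eq _ _ _ (by omega)
    rw [hout]
    unfold seqFinishA
    rw [List.length_map, List.length_range]
    by_cases hbig : max 0 (PySem.Int.floordiv (e - start) step + 1) > 1000
    · rw [if_pos (by omega), if_pos hbig]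
    · rw [if_neg (by omega), if_neg hbig]

theorem cmd_seq_spec' (args : List String) : cmd_seq args = cmd_seq_alt args := by
  unfold cmd_seq cmd_seq_alt
  match args with
  | [] => rfl
  | [a0] =>
    simp only [List.take, List.mapM_cons, List.mapM_nil, List.cons_ne_nil,
      not_false_iff, if_neg]
    cases PySem.Int.ofStr? a0 <;> simp [core_eq]
  | [a0, a1] =>
    simp only [List.take, List.mapM_cons, List.mapM_nil, List.cons_ne_nil,
      not_false_iff, if_neg]
    cases PySem.Int.ofStr? a0 <;> cases PySem.Int.ofStr? a1 <;> simp [core_eq]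
  | a0 :: a1 :: a2 :: rest =>
    simp only [List.take, List.mapM_cons, List.mapM_nil, List.cons_ne_nil,
      not_false_iff, if_neg]
    cases PySem.Int.ofStr? a0 <;> cases PySem.Int.ofStr? a1 <;> cases PySem.Int.ofStr? a2 <;>
      simp [core_eq]

-- ===== VERDICT (by name: the statement is the Claim_ definition above) =====
theorem cmd_seq_spec : Claim_equal_cmd_seq := by
  intro args _
  exact cmd_seq_spec' args
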